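-- pv_equiv track=rewrite | github.com/superjarle/Advent-of-Code | 2023/Python/day13.py | _find_reflection_line
-- ===== SOURCE A (Python) =====
-- def _find_reflection_line(pattern):
--     for i in range(len(pattern) - 1):
--         if pattern[i] == pattern[i + 1]:
--             for offset in range(1, min(i, len(pattern) - i - 2) + 1):
--                 if pattern[i - offset] != pattern[i + 1 + offset]:
--                     break
--             else:
--                 return i + 1
--     return -1
-- ===== SOURCE B (Python) =====
-- def _find_reflection_line(pattern):
--     # Mismatch sieve: a reflection line j is broken exactly by a pair of rows
--     # (t, u) with t + u == 2*j - 1 that differ.  Scan every odd-distance pair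
--     # once, marking the single line it breaks, then return the first unbroken line.
--     n = len(pattern)
--     bad = set()
--     for t in range(n):
--         for u in range(t + 1, n):
--             if (t + u) % 2 == 1 and pattern[t] != pattern[u]:
--                 bad.add((t + u + 1) // 2)
--     for j in range(1, n):
--         if j not in bad:
--             return j
--     return -1
-- ===== Notes on version B (the rewrite author's own statement) =====
-- stated objective: alternative
-- what changed: Replaces A's per-candidate centre-expansion (adjacent-equal test plus inner offset loop with break/for-else) by a mismatch sieve: one scan over all odd-distance row pairs marks, in a set, the unique reflection line each differing pair breaks, then a final scan returns the first unmarked line.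
import Mathlib
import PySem

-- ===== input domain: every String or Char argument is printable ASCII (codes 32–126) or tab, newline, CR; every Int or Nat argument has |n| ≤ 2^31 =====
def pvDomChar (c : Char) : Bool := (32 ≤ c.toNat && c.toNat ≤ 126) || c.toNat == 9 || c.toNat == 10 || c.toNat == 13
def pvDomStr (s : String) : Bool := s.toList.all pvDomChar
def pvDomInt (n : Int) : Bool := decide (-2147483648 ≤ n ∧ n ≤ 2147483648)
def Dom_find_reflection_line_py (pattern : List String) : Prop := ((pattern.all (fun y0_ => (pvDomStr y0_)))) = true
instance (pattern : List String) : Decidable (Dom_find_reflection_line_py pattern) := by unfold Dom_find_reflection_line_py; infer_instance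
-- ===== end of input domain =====

-- B replaces A's per-candidate centre-expansion by a mismatch sieve over odd-distance
-- row pairs (each differing pair breaks exactly one reflection line); objective: alternative.

-- ===== PORT A =====
-- inner 'for offset in range(1, min(i, len(pattern)-i-2)+1): if … != …: break / else: return i+1';
-- the for-else returns exactly when every offset matched: short-circuit .all is that loop
def pvA_inner (pattern : List String) (i : Int) : Bool :=
  (PySem.List.pyRange 1 (min i ((pattern.length : Int) - i - 2) + 1) 1).all
    (fun offset => PySem.List.pyGet? pattern (i - offset) == PySem.List.pyGet? pattern (i + 1 + offset))

def pvA_go (pattern : List String) : List Int → Int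
  | [] => -1
  | i :: rest =>
    if PySem.List.pyGet? pattern i == PySem.List.pyGet? pattern (i + 1) then
      if pvA_inner pattern i then i + 1 else pvA_go pattern rest
    else pvA_go pattern rest

def find_reflection_line_py (pattern : List String) : Int :=
  pvA_go pattern (PySem.List.pyRange 0 ((pattern.length : Int) - 1) 1)

-- ===== PORT B =====
-- 'bad = set(); for t in range(n): for u in range(t+1, n): if (t+u) % 2 == 1 and pattern[t] != pattern[u]: bad.add((t+u+1)//2)'
def pvB_bad (pattern : List String) : PySem.Set Int :=
  (PySem.List.pyRange 0 (pattern.length : Int) 1).foldl (fun bad t =>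
    (PySem.List.pyRange (t + 1) (pattern.length : Int) 1).foldl (fun bad u =>
      if PySem.Int.mod (t + u) 2 == 1 && !(PySem.List.pyGet? pattern t == PySem.List.pyGet? pattern u) then
        PySem.Set.add bad (PySem.Int.floordiv (t + u + 1) 2)
      else bad) bad) PySem.Set.empty

-- 'for j in range(1, n): if j not in bad: return j / return -1'
def pvB_scan (bad : PySem.Set Int) : List Int → Int
  | [] => -1
  | j :: rest => if !(PySem.Set.contains bad j) then j else pvB_scan bad rest

def find_reflection_line_py_alt (pattern : List String) : Int :=
  pvB_scan (pvB_bad pattern) (PySem.List.pyRange 1 (pattern.length : Int) 1)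

-- ===== PRECONDITION & SPEC =====
def Spec_find_reflection_line_py (pattern : List String) (out : Int) : Prop := out = find_reflection_line_py_alt pattern
instance (pattern : List String) (out : Int) : Decidable (Spec_find_reflection_line_py pattern out) := by unfold Spec_find_reflection_line_py; infer_instance

-- ===== CLAIM (what is proved, stated in full; the proofs are below) =====
def Claim_equal_find_reflection_line_py : Prop := ∀ (pattern : List String), Dom_find_reflection_line_py pattern → Spec_find_reflection_line_py pattern (find_reflection_line_py pattern)

-- ===== LEMMAS AND PROOFS =====

-- 'line j is broken': some differing odd-distance pair of rows is centred on it
def pvBadAt (p : List String) (j : Int) : Prop :=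
  ∃ t u : Nat, t < u ∧ u < p.length ∧ (t + u) % 2 = 1 ∧ p[t]? ≠ p[u]? ∧ j = ((((t + u + 1) / 2 : Nat)) : Int)

-- membership in B's inner fold (sieving the pairs (t, u) for u ∈ L)
theorem pv_mem_inner (p : List String) (t : Int) (s : PySem.Set Int) (L : List Int) (j : Int) :
    (j ∈ L.foldl (fun bad u =>
      if PySem.Int.mod (t + u) 2 == 1 && !(PySem.List.pyGet? p t == PySem.List.pyGet? p u) then
        PySem.Set.add bad (PySem.Int.floordiv (t + u + 1) 2)
      else bad) s) ↔
    j ∈ s ∨ ∃ u ∈ L, (PySem.Int.mod (t + u) 2 = 1 ∧ PySem.List.pyGet? p t ≠ PySem.List.pyGet? p u)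
      ∧ j = PySem.Int.floordiv (t + u + 1) 2 := by
  induction L generalizing s with
  | nil => simp
  | cons u rest ih =>
    simp only [List.foldl_cons]
    rw [ih]
    by_cases hb : (PySem.Int.mod (t + u) 2 == 1 && !(PySem.List.pyGet? p t == PySem.List.pyGet? p u)) = true
    · rw [if_pos hb]
      have hb' : PySem.Int.mod (t + u) 2 = 1 ∧ PySem.List.pyGet? p t ≠ PySem.List.pyGet? p u := by
        simpa using hb
      rw [PySem.Set.mem_add]
      constructor
      · rintro (⟨hs | he⟩ | ⟨u', hu', hc, hj⟩)
        · exact Or.inl hs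
        · exact Or.inr ⟨u, by simp, hb', he⟩
        · exact Or.inr ⟨u', by simp [hu'], hc, hj⟩
      · rintro (hs | ⟨u', hu', hc, hj⟩)
        · exact Or.inl (Or.inl hs)
        · rcases List.mem_cons.mp hu' with rfl | hu'
          · exact Or.inl (Or.inr hj)
          · exact Or.inr ⟨u', hu', hc, hj⟩
    · rw [if_neg hb]
      have hb' : PySem.Int.mod (t + u) 2 = 1 → PySem.List.pyGet? p t = PySem.List.pyGet? p u := by
        simpa using hb
      constructor
      · rintro (hs | ⟨u', hu', hc, hj⟩)
        · exact Or.inl hs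
        · exact Or.inr ⟨u', by simp [hu'], hc, hj⟩
      · rintro (hs | ⟨u', hu', hc, hj⟩)
        · exact Or.inl hs
        · rcases List.mem_cons.mp hu' with rfl | hu'
          · exact absurd (hb' hc.1) hc.2
          · exact Or.inr ⟨u', hu', hc, hj⟩

-- what B's sieve collects: exactly the broken lines
theorem pv_mem_bad (p : List String) (j : Int) : j ∈ pvB_bad p ↔ pvBadAt p j := by
  unfold pvB_bad
  have outer : ∀ (L : List Int) (s : PySem.Set Int),
      (j ∈ L.foldl (fun bad t =>
        (PySem.List.pyRange (t + 1) (p.length : Int) 1).foldl (fun bad u =>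
          if PySem.Int.mod (t + u) 2 == 1 && !(PySem.List.pyGet? p t == PySem.List.pyGet? p u) then
            PySem.Set.add bad (PySem.Int.floordiv (t + u + 1) 2)
          else bad) bad) s) ↔
      j ∈ s ∨ ∃ t ∈ L, ∃ u ∈ PySem.List.pyRange (t + 1) (p.length : Int) 1,
        (PySem.Int.mod (t + u) 2 = 1 ∧ PySem.List.pyGet? p t ≠ PySem.List.pyGet? p u)
          ∧ j = PySem.Int.floordiv (t + u + 1) 2 := by
    intro L
    induction L with
    | nil => simp
    | cons t rest ih =>
      intro s
      simp only [List.foldl_cons]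
      rw [ih, pv_mem_inner]
      constructor
      · rintro ((hs | ⟨u, hu, hc, hj⟩) | ⟨t', ht', rest'⟩)
        · exact Or.inl hs
        · exact Or.inr ⟨t, by simp, u, hu, hc, hj⟩
        · exact Or.inr ⟨t', by simp [ht'], rest'⟩
      · rintro (hs | ⟨t', ht', rest'⟩)
        · exact Or.inl (Or.inl hs)
        · rcases List.mem_cons.mp ht' with rfl | ht'
          · exact Or.inl (Or.inr rest')
          · exact Or.inr ⟨t', ht', rest'⟩
  rw [outer]
  simp only [PySem.Set.empty, List.not_mem_nil, false_or]
  unfold pvBadAt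
  constructor
  · rintro ⟨ti, hti, ui, hui, ⟨hodd, hne⟩, hj⟩
    rw [PySem.List.mem_pyRange_one] at hti hui
    obtain ⟨t, rfl⟩ : ∃ t : Nat, ti = (t : Int) := ⟨ti.toNat, by omega⟩
    obtain ⟨u, rfl⟩ : ∃ u : Nat, ui = (u : Int) := ⟨ui.toNat, by omega⟩
    have hcast : (t : Int) + (u : Int) = ((t + u : Nat) : Int) := by push_cast; ring
    have hmod : PySem.Int.mod ((t + u : Nat) : Int) 2 = (((t + u) % 2 : Nat) : Int) := by
      exact_mod_cast PySem.Int.mod_natCast (t + u) 2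
    refine ⟨t, u, by omega, by omega, ?_, ?_, ?_⟩
    · rw [hcast, hmod] at hodd; omega
    · simpa [PySem.List.pyGet?_natCast] using hne
    · rw [show (t : Int) + (u : Int) + 1 = ((t + u + 1 : Nat) : Int) by push_cast; ring] at hj
      rw [hj]
      exact_mod_cast PySem.Int.floordiv_natCast (t + u + 1) 2
  · rintro ⟨t, u, htu, hun, hodd, hne, hj⟩
    have hcast : (t : Int) + (u : Int) = ((t + u : Nat) : Int) := by push_cast; ring
    have hmod : PySem.Int.mod ((t + u : Nat) : Int) 2 = (((t + u) % 2 : Nat) : Int) := by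
      exact_mod_cast PySem.Int.mod_natCast (t + u) 2
    refine ⟨(t : Int), ?_, (u : Int), ?_, ⟨?_, ?_⟩, ?_⟩
    · rw [PySem.List.mem_pyRange_one]; omega
    · rw [PySem.List.mem_pyRange_one]; omega
    · rw [hcast, hmod]; omega
    · simpa [PySem.List.pyGet?_natCast] using hne
    · rw [show (t : Int) + (u : Int) + 1 = ((t + u + 1 : Nat) : Int) by push_cast; ring, hj]
      exact_mod_cast (PySem.Int.floordiv_natCast (t + u + 1) 2).symm

-- rows mirror around the line after index a, clipped to the nearer edge
def pvMirror (p : List String) (a : Nat) : Prop :=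
  ∀ o : Nat, o ≤ min a (p.length - a - 2) → p[a - o]? = p[a + 1 + o]?

-- A's combined per-candidate check (adjacent test plus inner loop) computes pvMirror
theorem pv_A_check (p : List String) (a : Nat) (ha : a + 1 < p.length) :
    (((PySem.List.pyGet? p (a : Int) == PySem.List.pyGet? p ((a : Int) + 1)) &&
      pvA_inner p (a : Int)) = true) ↔ pvMirror p a := by
  have e2 : min ((a : Int)) ((p.length : Int) - (a : Int) - 2) + 1 =
      (((min a (p.length - a - 2) + 1 : Nat)) : Int) := by push_cast; omega
  unfold pvA_inner pvMirror
  rw [e2, PySem.List.pyRange_one]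
  simp only [Bool.and_eq_true, List.all_eq_true, List.mem_map, List.mem_range, beq_iff_eq,
    forall_exists_index]
  constructor
  · rintro ⟨h0, hrest⟩ o ho
    match o with
    | 0 =>
      rw [show ((a : Int) + 1) = ((a + 1 : Nat) : Int) by push_cast; ring,
        PySem.List.pyGet?_natCast, PySem.List.pyGet?_natCast] at h0
      simpa using h0
    | o' + 1 =>
      have hx := hrest (1 + (o' : Int)) o' ⟨by omega, rfl⟩
      rw [show (a : Int) - (1 + (o' : Int)) = ((a - (o' + 1) : Nat) : Int) by omega,
          show (a : Int) + 1 + (1 + (o' : Int)) = ((a + 1 + (o' + 1) : Nat) : Int) by push_cast; ring,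
          PySem.List.pyGet?_natCast, PySem.List.pyGet?_natCast] at hx
      simpa using hx
  · intro h
    refine ⟨?_, ?_⟩
    · have := h 0 (by omega)
      rw [show ((a : Int) + 1) = ((a + 1 : Nat) : Int) by push_cast; ring,
        PySem.List.pyGet?_natCast, PySem.List.pyGet?_natCast]
      simpa using this
    · rintro x k ⟨hk, rfl⟩
      have := h (k + 1) (by omega)
      rw [show (a : Int) - (1 + (k : Int)) = ((a - (k + 1) : Nat) : Int) by omega,
          show (a : Int) + 1 + (1 + (k : Int)) = ((a + 1 + (k + 1) : Nat) : Int) by push_cast; ring,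
          PySem.List.pyGet?_natCast, PySem.List.pyGet?_natCast]
      simpa using this

-- B's sieve verdict at line a+1 computes the same (pairs (t,u) with t+u = 2a+1 ↔ offsets)
theorem pv_B_check (p : List String) (a : Nat) (ha : a + 1 < p.length) :
    ¬ pvBadAt p ((a : Int) + 1) ↔ pvMirror p a := by
  unfold pvBadAt pvMirror
  constructor
  · intro h o ho
    by_contra hne
    exact h ⟨a - o, a + 1 + o, by omega, by omega, by omega, hne, by push_cast; omega⟩
  · rintro h ⟨t, u, htu, hun, hodd, hne, hj⟩
    have htu2 : t + u = 2 * a + 1 := by omega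
    have hx := h (u - (a + 1)) (by omega)
    rw [show a - (u - (a + 1)) = t by omega, show a + 1 + (u - (a + 1)) = u by omega] at hx
    exact hne hx

-- the two loops track each other: A's index a is B's candidate line a+1
theorem pv_go_eq_aux (p : List String) (fuel : Nat) : ∀ (a : Nat), p.length ≤ a + fuel →
    pvA_go p (PySem.List.pyRange a ((p.length : Int) - 1) 1) =
    pvB_scan (pvB_bad p) (PySem.List.pyRange ((a : Int) + 1) (p.length : Int) 1) := by
  induction fuel with
  | zero =>
    intro a h
    rw [PySem.List.pyRange_one_eq_nil (by omega), PySem.List.pyRange_one_eq_nil (by omega)]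
    rfl
  | succ f ih =>
    intro a h
    by_cases hlt : a + 1 < p.length
    · rw [PySem.List.pyRange_one_cons (show (a : Int) < (p.length : Int) - 1 by omega)]
      rw [show PySem.List.pyRange ((a : Int) + 1) (p.length : Int) 1 =
            ((a : Int) + 1) :: PySem.List.pyRange ((a : Int) + 1 + 1) (p.length : Int) 1 from
          PySem.List.pyRange_one_cons (by omega)]
      simp only [pvA_go, pvB_scan]
      have hrest := ih (a + 1) (by omega)
      rw [show ((a + 1 : Nat) : Int) = (a : Int) + 1 by push_cast; ring] at hrest
      by_cases hmem : ((a : Int) + 1) ∈ pvB_bad p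
      · -- line broken: A's check fails, both recurse
        have hb : pvBadAt p ((a : Int) + 1) := (pv_mem_bad p _).mp hmem
        have hAfalse : ((PySem.List.pyGet? p (a : Int) == PySem.List.pyGet? p ((a : Int) + 1)) &&
            pvA_inner p (a : Int)) = false := by
          rw [Bool.eq_false_iff]
          intro hx
          exact ((pv_B_check p a hlt).mpr ((pv_A_check p a hlt).mp hx)) hb
        by_cases h1 : p[a]? = PySem.List.pyGet? p ((a : Int) + 1)
        · have h2 : pvA_inner p (a : Int) = false := by
            simp only [PySem.List.pyGet?_natCast, h1] at hAfalse
            simpa using hAfalse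
          simp [h1, h2, hmem, hrest]
        · simp [h1, hmem, hrest]
      · -- line not broken: both return a+1
        have hnb : ¬ pvBadAt p ((a : Int) + 1) := fun hbb => hmem ((pv_mem_bad p _).mpr hbb)
        have hA := (pv_A_check p a hlt).mpr ((pv_B_check p a hlt).mp hnb)
        rcases Bool.and_eq_true_iff.mp hA with ⟨h1, h2⟩
        simp only [beq_iff_eq, PySem.List.pyGet?_natCast] at h1
        simp [h1, h2, hmem]
    · rw [PySem.List.pyRange_one_eq_nil (by omega), PySem.List.pyRange_one_eq_nil (by omega)]
      rfl

-- ===== VERDICT (by name: the statement is the Claim_ definition above) =====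
theorem find_reflection_line_py_spec : Claim_equal_find_reflection_line_py := by
  intro pattern _
  unfold Spec_find_reflection_line_py find_reflection_line_py find_reflection_line_py_alt
  simpa using pv_go_eq_aux pattern pattern.length 0 (by omega)
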